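-- pv_equiv track=rewrite | github.com/Hyun-Ho95/CodingTest_Python-SQL | 프로그래머스/unrated/181874. A 강조하기/A 강조하기.py | solution
-- ===== SOURCE A (Python) =====
-- def solution(myString):
--     myString = list(myString)  # 문자열을 리스트로 변환
--
--     for idx, k in enumerate(myString):
--         if k == 'a':
--             myString[idx] = 'A'
--         elif k != 'A' and k.isupper():
--             myString[idx] = k.lower()
--
--     myString = ''.join(myString)  # 리스트를 문자열로 변환
--     return myString
-- ===== SOURCE B (Python) =====
-- def solution(myString):
--     return myString.lower().replace('a', 'A')
-- ===== Notes on version B (the rewrite author's own statement) =====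
-- stated objective: simpler
-- what changed: Replaces the per-character enumerate loop with index assignment by two whole-string library passes: lowercase everything, then replace the lowercase-a character with its uppercase form.
import Mathlib
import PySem

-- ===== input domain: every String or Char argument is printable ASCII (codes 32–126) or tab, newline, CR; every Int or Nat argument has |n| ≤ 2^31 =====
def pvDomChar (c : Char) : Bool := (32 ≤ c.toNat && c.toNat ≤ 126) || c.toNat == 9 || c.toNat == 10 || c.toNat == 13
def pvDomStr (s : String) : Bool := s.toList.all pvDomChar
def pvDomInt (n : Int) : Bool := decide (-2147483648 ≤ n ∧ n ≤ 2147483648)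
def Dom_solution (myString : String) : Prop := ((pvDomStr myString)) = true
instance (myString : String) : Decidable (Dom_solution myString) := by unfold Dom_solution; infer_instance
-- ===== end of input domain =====

-- B replaces A's per-character enumerate loop (uppercase→lower, 'a'→'A' by index assignment)
-- with two whole-string library passes: lower() then replace('a','A'). Objective: simpler.


-- ===== PORT A =====
-- the loop body: on (idx, k) set position idx of the accumulator (enumerate yields idx ≥ 0,
-- so .toNat is exact); k.lower() on a one-character string is Chars.lowerChar (exact)
def solutionStep (acc : List Char) (p : Int × Char) : List Char :=
  if p.2 = 'a' then acc.set p.1.toNat 'A'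
  else if p.2 ≠ 'A' ∧ PySem.Chars.isupper p.2 then acc.set p.1.toNat (PySem.Chars.lowerChar p.2)
  else acc

def solution (myString : String) : String :=
  let l := myString.toList                                    -- myString = list(myString)
  String.ofList ((PySem.List.enumerate l).foldl solutionStep l)  -- the for loop, then ''.join

-- ===== PORT B =====
def solution_alt (myString : String) : String :=
  PySem.Str.replace (PySem.Str.lower myString) "a" "A"

-- ===== PRECONDITION & SPEC =====
def Spec_solution (myString : String) (out : String) : Prop := out = solution_alt myString
instance (myString : String) (out : String) : Decidable (Spec_solution myString out) := by unfold Spec_solution; infer_instance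

-- ===== CLAIM (what is proved, stated in full; the proofs are below) =====
def Claim_equal_solution : Prop := ∀ (myString : String), Dom_solution myString → Spec_solution myString (solution myString)

-- ===== LEMMAS AND PROOFS =====

-- A's per-character result
def fA (c : Char) : Char :=
  if c = 'a' then 'A'
  else if c ≠ 'A' ∧ PySem.Chars.isupper c then PySem.Chars.lowerChar c
  else c

-- B's second pass, per character (replace with a one-char pattern)
def gB (c : Char) : Char := if c = 'a' then 'A' else c

theorem char_toNat_inj {a b : Char} (h : a.toNat = b.toNat) : a = b := by
  apply Char.ext; unfold Char.toNat at h; exact UInt32.toNat.inj h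

theorem foldl_enumerate_set (l : List Char) : ∀ (pre : List Char),
    (PySem.List.enumerate l (pre.length : Int)).foldl solutionStep (pre ++ l) = pre ++ l.map fA := by
  induction l with
  | nil => intro pre; simp [PySem.List.enumerate]
  | cons c t ih =>
    intro pre
    have hstep : solutionStep (pre ++ c :: t) ((pre.length : Int), c) = (pre ++ [fA c]) ++ t := by
      simp [solutionStep, fA]
      split_ifs <;> simp_all
    have hlen : ((pre.length : Int) + 1) = (((pre ++ [fA c]).length : Nat) : Int) := by simp
    calc (PySem.List.enumerate (c :: t) (pre.length : Int)).foldl solutionStep (pre ++ c :: t)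
        = (PySem.List.enumerate t ((pre.length : Int) + 1)).foldl solutionStep ((pre ++ [fA c]) ++ t) := by
          simp [PySem.List.enumerate, hstep]
      _ = (pre ++ [fA c]) ++ t.map fA := by rw [hlen, ih]
      _ = pre ++ (c :: t).map fA := by simp

theorem replace_single (l : List Char) : ∀ acc : List Char,
    PySem.Chars.replace.go ['a'] ['A'] l.length l acc = acc.reverse ++ l.map gB := by
  induction l with
  | nil => intro acc; simp [PySem.Chars.replace.go]
  | cons c t ih =>
    intro acc
    by_cases h : c = 'a'
    · subst h
      simpa [PySem.Chars.replace.go, List.isPrefixOf, gB] using ih ('A' :: acc)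
    · have hpre : (['a'].isPrefixOf (c :: t)) = false := by
        simp [List.isPrefixOf]
        exact fun hh => h hh.symm
      simpa [PySem.Chars.replace.go, hpre, gB, h] using ih (c :: acc)

theorem pointwise (c : Char) : gB (PySem.Chars.lowerChar c) = fA c := by
  by_cases hu : PySem.Chars.isupper c = true
  · have hb : 65 ≤ c.toNat ∧ c.toNat ≤ 90 := by
      unfold PySem.Chars.isupper at hu
      simp only [Bool.and_eq_true, decide_eq_true_eq, Char.le_def, UInt32.le_iff_toNat_le] at hu
      exact hu
    have hval : (c.toNat + 32).isValidChar := Or.inl (by omega)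
    have hof : (Char.ofNat (c.toNat + 32)).toNat = c.toNat + 32 := by
      rw [Char.toNat_ofNat, if_pos hval]
    by_cases hA : c = 'A'
    · subst hA; decide
    · have hca : c ≠ 'a' := by
        intro h; subst h
        have : (97 : Nat) ≤ 90 := by simpa using hb.2
        omega
      have hne : Char.ofNat (c.toNat + 32) ≠ 'a' := by
        intro h
        have h2 := congrArg Char.toNat h
        rw [hof] at h2
        have h97 : ('a').toNat = 97 := by decide
        rw [h97] at h2
        have h65 : c.toNat = 65 := by omega
        exact hA (char_toNat_inj (by rw [h65]; decide))
      unfold gB fA PySem.Chars.lowerChar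
      simp [hu, hA, hca, hne]
  · have hu' : PySem.Chars.isupper c = false := by simpa using hu
    unfold gB fA PySem.Chars.lowerChar
    simp [hu']

theorem list_eq (l : List Char) :
    PySem.Chars.replace (PySem.Chars.lower l) ['a'] ['A'] = l.map fA := by
  unfold PySem.Chars.replace PySem.Chars.lower
  simp only [List.isEmpty_cons, Bool.false_eq_true, if_false]
  rw [replace_single]
  simp [Function.comp, pointwise]

-- ===== VERDICT (by name: the statement is the Claim_ definition above) =====
theorem solution_spec : Claim_equal_solution := by
  intro s _
  unfold Spec_solution solution solution_alt
  apply String.ext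
  simp only [PySem.Str.toList_replace, PySem.Str.toList_lower, String.toList_ofList]
  have hab : ("a" : String).toList = ['a'] := rfl
  have hAB : ("A" : String).toList = ['A'] := rfl
  rw [hab, hAB, list_eq]
  have h := foldl_enumerate_set s.toList []
  simpa using h
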